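-- pv_equiv track=rewrite | github.com/aklofas/kicad-happy-testharness | validate/validate_schema.py | diff_inventories
-- ===== SOURCE A (Python) =====
-- def diff_inventories(saved, current):
--     """Diff two inventories, returning changes per detector/section.
--
--     Returns list of {detector, change_type, field, details}.
--     change_type is one of: "added", "removed", "count_changed".
--     """
--     changes = []
--
--     for category in ("schematic", "pcb", "spice", "emc", "gerber"):
--         saved_cat = saved.get(category, {})
--         current_cat = current.get(category, {})
--
--         all_detectors = set(saved_cat) | set(current_cat)
--         for detector in sorted(all_detectors):
--             saved_fields = set(saved_cat.get(detector, {}))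
--             current_fields = set(current_cat.get(detector, {}))
--
--             # New detector
--             if detector not in saved_cat:
--                 changes.append({
--                     "category": category,
--                     "detector": detector,
--                     "change_type": "new_detector",
--                     "field": None,
--                     "details": f"{len(current_fields)} fields",
--                 })
--                 continue
--
--             # Removed detector
--             if detector not in current_cat:
--                 changes.append({
--                     "category": category,
--                     "detector": detector,
--                     "change_type": "removed_detector",
--                     "field": None,
--                     "details": f"had {len(saved_fields)} fields",
--                 })
--                 continue
--
--             # Added fields (skip internal _-prefixed metadata fields)
--             for field in sorted(current_fields - saved_fields):
--                 if field.startswith("_"):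
--                     continue
--                 count = current_cat[detector][field]
--                 changes.append({
--                     "category": category,
--                     "detector": detector,
--                     "change_type": "added",
--                     "field": field,
--                     "details": f"appears in {count} items",
--                 })
--
--             # Removed fields (skip internal _-prefixed metadata fields)
--             for field in sorted(saved_fields - current_fields):
--                 if field.startswith("_"):
--                     continue
--                 prev_count = saved_cat[detector][field]
--                 changes.append({
--                     "category": category,
--                     "detector": detector,
--                     "change_type": "removed",
--                     "field": field,
--                     "details": f"was in {prev_count} items",
--                 })
--
--     # Heuristic: detect renames (field removed + field added in same detector)
--     for change in list(changes):
--         if change["change_type"] == "removed":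
--             # Look for a matching "added" in same detector
--             for other in changes:
--                 if (other["change_type"] == "added"
--                         and other["detector"] == change["detector"]
--                         and other["category"] == change["category"]):
--                     change["details"] += f" (possible rename → {other['field']}?)"
--                     break
--
--     return changes
-- ===== SOURCE B (Python) =====
-- def _detector_changes(category, detector, saved_cat, current_cat):
--     """Change entries for one (category, detector) block, with the possible-rename
--     annotation computed inline from the first non-underscore added field."""
--     saved_fields = set(saved_cat.get(detector, {}))
--     current_fields = set(current_cat.get(detector, {}))
--     if detector not in saved_cat:
--         return [{"category": category, "detector": detector,
--                  "change_type": "new_detector", "field": None,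
--                  "details": f"{len(current_fields)} fields"}]
--     if detector not in current_cat:
--         return [{"category": category, "detector": detector,
--                  "change_type": "removed_detector", "field": None,
--                  "details": f"had {len(saved_fields)} fields"}]
--     added = [f for f in sorted(current_fields - saved_fields)
--              if not f.startswith("_")]
--     removed = [f for f in sorted(saved_fields - current_fields)
--                if not f.startswith("_")]
--     rename = f" (possible rename \u2192 {added[0]}?)" if added else ""
--     return ([{"category": category, "detector": detector,
--               "change_type": "added", "field": f,
--               "details": f"appears in {current_cat[detector][f]} items"}
--              for f in added] +
--             [{"category": category, "detector": detector,
--               "change_type": "removed", "field": f,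
--               "details": f"was in {saved_cat[detector][f]} items{rename}"}
--              for f in removed])
--
--
-- def diff_inventories(saved, current):
--     """Diff two inventories, returning changes per detector/section.
--
--     Single pass over the blocks: no post-hoc rename-detection rescan of the
--     built change list.
--     """
--     return [change
--             for category in ("schematic", "pcb", "spice", "emc", "gerber")
--             for detector in sorted(set(saved.get(category, {}))
--                                    | set(current.get(category, {})))
--             for change in _detector_changes(category, detector,
--                                             saved.get(category, {}),
--                                             current.get(category, {}))]
-- ===== Notes on version B (the rewrite author's own statement) =====
-- stated objective: alternative
-- what changed: The trailing rename-detection pass, which rescans the built change list for each removed entry and patches its details in place, is dropped; the rename annotation is computed inline per detector block from the first non-underscore added field, and the result is built as a single flat comprehension over a pure per-block helper instead of an accumulator mutated and patched afterwards.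
import Mathlib
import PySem

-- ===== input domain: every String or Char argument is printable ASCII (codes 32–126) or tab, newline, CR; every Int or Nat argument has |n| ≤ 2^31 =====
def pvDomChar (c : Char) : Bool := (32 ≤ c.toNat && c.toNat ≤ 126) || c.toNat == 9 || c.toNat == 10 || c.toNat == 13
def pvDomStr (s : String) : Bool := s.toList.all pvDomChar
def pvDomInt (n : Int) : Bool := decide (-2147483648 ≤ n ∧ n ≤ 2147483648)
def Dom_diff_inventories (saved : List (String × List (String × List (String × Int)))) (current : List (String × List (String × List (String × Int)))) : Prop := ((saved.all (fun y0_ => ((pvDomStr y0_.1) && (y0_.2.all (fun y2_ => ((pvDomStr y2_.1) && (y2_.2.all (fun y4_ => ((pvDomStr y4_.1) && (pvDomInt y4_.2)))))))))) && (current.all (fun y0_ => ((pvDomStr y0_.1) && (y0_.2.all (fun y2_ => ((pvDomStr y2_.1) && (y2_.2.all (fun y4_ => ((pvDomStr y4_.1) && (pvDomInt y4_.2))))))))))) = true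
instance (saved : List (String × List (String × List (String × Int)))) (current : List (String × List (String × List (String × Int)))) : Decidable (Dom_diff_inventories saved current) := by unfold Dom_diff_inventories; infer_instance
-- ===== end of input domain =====

-- B replaces A's trailing rename-detection rescan of the built change list by an inline
-- annotation computed from the first non-underscore added field of the same detector block.

-- Both ports build the same change-dict literal: {"category": …, "detector": …, "change_type": …, "field": …, "details": …}
def pvMkChange (category detector change_type : String) (field : Option String) (details : String) : List (String × Option String) :=
  [("category", some category), ("detector", some detector), ("change_type", some change_type),
   ("field", field), ("details", some details)]

-- f-string rendering of the "field" value of a change entry (always `some (some f)` on "added" entries;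
-- str(None) = "None"; the missing-key case cannot occur on entries both programs build)
def pvFieldStr : Option (Option String) → String
  | some (some f) => f
  | some none => "None"
  | none => "None"

-- ===== PORT A =====
def diff_inventories (saved : List (String × List (String × List (String × Int)))) (current : List (String × List (String × List (String × Int)))) : List (List (String × Option String)) :=
  let changes := ["schematic", "pcb", "spice", "emc", "gerber"].foldl (fun changes category =>
    let saved_cat := (PySem.Dict.mk saved).getD category []
    let current_cat := (PySem.Dict.mk current).getD category []
    let all_detectors := PySem.Set.union (PySem.Set.ofList ((PySem.Dict.mk saved_cat).keys))
      (PySem.Set.ofList ((PySem.Dict.mk current_cat).keys))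
    (PySem.List.sorted all_detectors (fun d => d)).foldl (fun changes detector =>
      let saved_fields := PySem.Set.ofList ((PySem.Dict.mk ((PySem.Dict.mk saved_cat).getD detector [])).keys)
      let current_fields := PySem.Set.ofList ((PySem.Dict.mk ((PySem.Dict.mk current_cat).getD detector [])).keys)
      if !((PySem.Dict.mk saved_cat).contains detector) then
        changes ++ [pvMkChange category detector "new_detector" none
          (PySem.Int.toStr (PySem.Set.len current_fields) ++ " fields")]
      else if !((PySem.Dict.mk current_cat).contains detector) then
        changes ++ [pvMkChange category detector "removed_detector" none
          ("had " ++ PySem.Int.toStr (PySem.Set.len saved_fields) ++ " fields")]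
      else
        -- added fields loop (count lookup current_cat[detector][field] is always present: getD default unreachable)
        let changes1 := (PySem.List.sorted (PySem.Set.diff current_fields saved_fields) (fun f => f)).foldl
          (fun changes field =>
            if PySem.Str.startswith field "_" then changes
            else changes ++ [pvMkChange category detector "added" (some field)
              ("appears in " ++ PySem.Int.toStr ((PySem.Dict.mk ((PySem.Dict.mk current_cat).getD detector [])).getD field 0) ++ " items")]) changes
        -- removed fields loop
        (PySem.List.sorted (PySem.Set.diff saved_fields current_fields) (fun f => f)).foldl
          (fun changes field =>
            if PySem.Str.startswith field "_" then changes
            else changes ++ [pvMkChange category detector "removed" (some field)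
              ("was in " ++ PySem.Int.toStr ((PySem.Dict.mk ((PySem.Dict.mk saved_cat).getD detector [])).getD field 0) ++ " items")]) changes1
      ) changes) []
  -- rename-detection pass: mutate each "removed" entry's details from the first matching "added" entry
  changes.map (fun change =>
    if (PySem.Dict.mk change).get? "change_type" == some (some "removed") then
      match changes.find? (fun other =>
          ((PySem.Dict.mk other).get? "change_type" == some (some "added")) &&
          ((PySem.Dict.mk other).get? "detector" == (PySem.Dict.mk change).get? "detector") &&
          ((PySem.Dict.mk other).get? "category" == (PySem.Dict.mk change).get? "category")) with
      | some other =>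
          ((PySem.Dict.mk change).modify "details" none
            (Option.map (fun s => s ++ (" (possible rename → " ++ pvFieldStr ((PySem.Dict.mk other).get? "field") ++ "?)")))).items
      | none => change
    else change)

-- ===== PORT B =====
def pvDetectorChanges (category detector : String) (saved_cat current_cat : List (String × List (String × Int))) : List (List (String × Option String)) :=
  let saved_fields := PySem.Set.ofList ((PySem.Dict.mk ((PySem.Dict.mk saved_cat).getD detector [])).keys)
  let current_fields := PySem.Set.ofList ((PySem.Dict.mk ((PySem.Dict.mk current_cat).getD detector [])).keys)
  if !((PySem.Dict.mk saved_cat).contains detector) then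
    [pvMkChange category detector "new_detector" none
      (PySem.Int.toStr (PySem.Set.len current_fields) ++ " fields")]
  else if !((PySem.Dict.mk current_cat).contains detector) then
    [pvMkChange category detector "removed_detector" none
      ("had " ++ PySem.Int.toStr (PySem.Set.len saved_fields) ++ " fields")]
  else
    let added := (PySem.List.sorted (PySem.Set.diff current_fields saved_fields) (fun f => f)).filter
      (fun f => !(PySem.Str.startswith f "_"))
    let removed := (PySem.List.sorted (PySem.Set.diff saved_fields current_fields) (fun f => f)).filter
      (fun f => !(PySem.Str.startswith f "_"))
    let rename := match added.head? with
      | some f => " (possible rename → " ++ f ++ "?)"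
      | none => ""
    added.map (fun f => pvMkChange category detector "added" (some f)
      ("appears in " ++ PySem.Int.toStr ((PySem.Dict.mk ((PySem.Dict.mk current_cat).getD detector [])).getD f 0) ++ " items"))
    ++ removed.map (fun f => pvMkChange category detector "removed" (some f)
      ("was in " ++ PySem.Int.toStr ((PySem.Dict.mk ((PySem.Dict.mk saved_cat).getD detector [])).getD f 0) ++ " items" ++ rename))

def diff_inventories_alt (saved : List (String × List (String × List (String × Int)))) (current : List (String × List (String × List (String × Int)))) : List (List (String × Option String)) :=
  ["schematic", "pcb", "spice", "emc", "gerber"].flatMap (fun category =>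
    (PySem.List.sorted (PySem.Set.union (PySem.Set.ofList ((PySem.Dict.mk ((PySem.Dict.mk saved).getD category [])).keys))
        (PySem.Set.ofList ((PySem.Dict.mk ((PySem.Dict.mk current).getD category [])).keys))) (fun d => d)).flatMap
      (fun detector =>
        pvDetectorChanges category detector ((PySem.Dict.mk saved).getD category [])
          ((PySem.Dict.mk current).getD category [])))

-- ===== PRECONDITION & SPEC =====
def Spec_diff_inventories (saved : List (String × List (String × List (String × Int)))) (current : List (String × List (String × List (String × Int)))) (out : List (List (String × Option String))) : Prop := out = diff_inventories_alt saved current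
instance (saved : List (String × List (String × List (String × Int)))) (current : List (String × List (String × List (String × Int)))) (out : List (List (String × Option String))) : Decidable (Spec_diff_inventories saved current out) := by unfold Spec_diff_inventories; infer_instance

-- ===== CLAIM (what is proved, stated in full; the proofs are below) =====
def Claim_equal_diff_inventories : Prop := ∀ (saved : List (String × List (String × List (String × Int)))) (current : List (String × List (String × List (String × Int)))), Dom_diff_inventories saved current → Spec_diff_inventories saved current (diff_inventories saved current)

-- ===== LEMMAS AND PROOFS =====

-- proof-side names for the shared sub-expressions of the two ports
def pvCat (inv : List (String × List (String × List (String × Int)))) (c : String) : List (String × List (String × Int)) :=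
  (PySem.Dict.mk inv).getD c []

def pvDets (saved current : List (String × List (String × List (String × Int)))) (c : String) : List String :=
  PySem.List.sorted (PySem.Set.union (PySem.Set.ofList ((PySem.Dict.mk (pvCat saved c)).keys))
    (PySem.Set.ofList ((PySem.Dict.mk (pvCat current c)).keys))) (fun d => d)

-- A's per-(category, detector) block of changes, before the rename pass, in filter/map normal form
def pvBlockA (category detector : String) (saved_cat current_cat : List (String × List (String × Int))) : List (List (String × Option String)) :=
  let saved_fields := PySem.Set.ofList ((PySem.Dict.mk ((PySem.Dict.mk saved_cat).getD detector [])).keys)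
  let current_fields := PySem.Set.ofList ((PySem.Dict.mk ((PySem.Dict.mk current_cat).getD detector [])).keys)
  if !((PySem.Dict.mk saved_cat).contains detector) then
    [pvMkChange category detector "new_detector" none
      (PySem.Int.toStr (PySem.Set.len current_fields) ++ " fields")]
  else if !((PySem.Dict.mk current_cat).contains detector) then
    [pvMkChange category detector "removed_detector" none
      ("had " ++ PySem.Int.toStr (PySem.Set.len saved_fields) ++ " fields")]
  else
    ((PySem.List.sorted (PySem.Set.diff current_fields saved_fields) (fun f => f)).filter
        (fun f => !(PySem.Str.startswith f "_"))).map (fun f =>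
      pvMkChange category detector "added" (some f)
        ("appears in " ++ PySem.Int.toStr ((PySem.Dict.mk ((PySem.Dict.mk current_cat).getD detector [])).getD f 0) ++ " items"))
    ++ ((PySem.List.sorted (PySem.Set.diff saved_fields current_fields) (fun f => f)).filter
        (fun f => !(PySem.Str.startswith f "_"))).map (fun f =>
      pvMkChange category detector "removed" (some f)
        ("was in " ++ PySem.Int.toStr ((PySem.Dict.mk ((PySem.Dict.mk saved_cat).getD detector [])).getD f 0) ++ " items"))

-- the list A has built when the rename pass starts
def pvL (saved current : List (String × List (String × List (String × Int)))) : List (List (String × Option String)) :=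
  ["schematic", "pcb", "spice", "emc", "gerber"].flatMap (fun c =>
    (pvDets saved current c).flatMap (fun d => pvBlockA c d (pvCat saved c) (pvCat current c)))

-- A's rename-pass body
def pvFix (changes : List (List (String × Option String))) (change : List (String × Option String)) : List (String × Option String) :=
  if (PySem.Dict.mk change).get? "change_type" == some (some "removed") then
    match changes.find? (fun other =>
        ((PySem.Dict.mk other).get? "change_type" == some (some "added")) &&
        ((PySem.Dict.mk other).get? "detector" == (PySem.Dict.mk change).get? "detector") &&
        ((PySem.Dict.mk other).get? "category" == (PySem.Dict.mk change).get? "category")) with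
    | some other =>
        ((PySem.Dict.mk change).modify "details" none
          (Option.map (fun s => s ++ (" (possible rename → " ++ pvFieldStr ((PySem.Dict.mk other).get? "field") ++ "?)")))).items
    | none => change
  else change

-- A's rename-search predicate, with the searched-for key (category c, detector d) explicit
def pvPred (c d : String) (other : List (String × Option String)) : Bool :=
  ((PySem.Dict.mk other).get? "change_type" == some (some "added")) &&
  ((PySem.Dict.mk other).get? "detector" == some (some d)) &&
  ((PySem.Dict.mk other).get? "category" == some (some c))

-- flip the "continue"-style if into the positive form of PySem.List.foldl_append_if
theorem pvIfSwap (e : String → List (String × Option String)) :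
    (fun (acc : List (List (String × Option String))) (x : String) =>
      if PySem.Str.startswith x "_" then acc else acc ++ [e x])
    = (fun acc x => if (!(PySem.Str.startswith x "_")) = true then acc ++ [e x] else acc) := by
  funext acc x
  cases h : PySem.Str.startswith x "_" <;> rfl

-- one iteration of A's detector loop appends exactly pvBlockA
theorem pvInner (category detector : String) (sc cc : List (String × List (String × Int)))
    (acc : List (List (String × Option String))) :
    (let saved_fields := PySem.Set.ofList ((PySem.Dict.mk ((PySem.Dict.mk sc).getD detector [])).keys)
     let current_fields := PySem.Set.ofList ((PySem.Dict.mk ((PySem.Dict.mk cc).getD detector [])).keys)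
     if !((PySem.Dict.mk sc).contains detector) then
        acc ++ [pvMkChange category detector "new_detector" none
          (PySem.Int.toStr (PySem.Set.len current_fields) ++ " fields")]
      else if !((PySem.Dict.mk cc).contains detector) then
        acc ++ [pvMkChange category detector "removed_detector" none
          ("had " ++ PySem.Int.toStr (PySem.Set.len saved_fields) ++ " fields")]
      else
        let changes1 := (PySem.List.sorted (PySem.Set.diff current_fields saved_fields) (fun f => f)).foldl
          (fun changes field =>
            if PySem.Str.startswith field "_" then changes
            else changes ++ [pvMkChange category detector "added" (some field)
              ("appears in " ++ PySem.Int.toStr ((PySem.Dict.mk ((PySem.Dict.mk cc).getD detector [])).getD field 0) ++ " items")]) acc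
        (PySem.List.sorted (PySem.Set.diff saved_fields current_fields) (fun f => f)).foldl
          (fun changes field =>
            if PySem.Str.startswith field "_" then changes
            else changes ++ [pvMkChange category detector "removed" (some field)
              ("was in " ++ PySem.Int.toStr ((PySem.Dict.mk ((PySem.Dict.mk sc).getD detector [])).getD field 0) ++ " items")]) changes1)
    = acc ++ pvBlockA category detector sc cc := by
  unfold pvBlockA
  dsimp only
  split
  · rfl
  · split
    · rfl
    · rw [pvIfSwap, pvIfSwap, PySem.List.foldl_append_if, PySem.List.foldl_append_if,
        List.append_assoc]

-- A's detector loop over any detector list equals the concatenation of its blocks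
theorem pvDetsFold (c : String) (sc cc : List (String × List (String × Int)))
    (dets : List String) (acc : List (List (String × Option String))) :
    dets.foldl (fun changes detector =>
        let saved_fields := PySem.Set.ofList ((PySem.Dict.mk ((PySem.Dict.mk sc).getD detector [])).keys)
        let current_fields := PySem.Set.ofList ((PySem.Dict.mk ((PySem.Dict.mk cc).getD detector [])).keys)
        if !((PySem.Dict.mk sc).contains detector) then
          changes ++ [pvMkChange c detector "new_detector" none
            (PySem.Int.toStr (PySem.Set.len current_fields) ++ " fields")]
        else if !((PySem.Dict.mk cc).contains detector) then
          changes ++ [pvMkChange c detector "removed_detector" none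
            ("had " ++ PySem.Int.toStr (PySem.Set.len saved_fields) ++ " fields")]
        else
          let changes1 := (PySem.List.sorted (PySem.Set.diff current_fields saved_fields) (fun f => f)).foldl
            (fun changes field =>
              if PySem.Str.startswith field "_" then changes
              else changes ++ [pvMkChange c detector "added" (some field)
                ("appears in " ++ PySem.Int.toStr ((PySem.Dict.mk ((PySem.Dict.mk cc).getD detector [])).getD field 0) ++ " items")]) changes
          (PySem.List.sorted (PySem.Set.diff saved_fields current_fields) (fun f => f)).foldl
            (fun changes field =>
              if PySem.Str.startswith field "_" then changes
              else changes ++ [pvMkChange c detector "removed" (some field)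
                ("was in " ++ PySem.Int.toStr ((PySem.Dict.mk ((PySem.Dict.mk sc).getD detector [])).getD field 0) ++ " items")]) changes1) acc
    = acc ++ dets.flatMap (fun d => pvBlockA c d sc cc) := by
  induction dets generalizing acc with
  | nil => simp
  | cons d ds ih =>
    rw [List.foldl_cons, List.flatMap_cons, ih, pvInner, List.append_assoc]

-- one iteration of A's category loop
theorem pvCatStep (saved current : List (String × List (String × List (String × Int))))
    (c : String) (acc : List (List (String × Option String))) :
    (let saved_cat := (PySem.Dict.mk saved).getD c []
     let current_cat := (PySem.Dict.mk current).getD c []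
     let all_detectors := PySem.Set.union (PySem.Set.ofList ((PySem.Dict.mk saved_cat).keys))
       (PySem.Set.ofList ((PySem.Dict.mk current_cat).keys))
     (PySem.List.sorted all_detectors (fun d => d)).foldl (fun changes detector =>
        let saved_fields := PySem.Set.ofList ((PySem.Dict.mk ((PySem.Dict.mk saved_cat).getD detector [])).keys)
        let current_fields := PySem.Set.ofList ((PySem.Dict.mk ((PySem.Dict.mk current_cat).getD detector [])).keys)
        if !((PySem.Dict.mk saved_cat).contains detector) then
          changes ++ [pvMkChange c detector "new_detector" none
            (PySem.Int.toStr (PySem.Set.len current_fields) ++ " fields")]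
        else if !((PySem.Dict.mk current_cat).contains detector) then
          changes ++ [pvMkChange c detector "removed_detector" none
            ("had " ++ PySem.Int.toStr (PySem.Set.len saved_fields) ++ " fields")]
        else
          let changes1 := (PySem.List.sorted (PySem.Set.diff current_fields saved_fields) (fun f => f)).foldl
            (fun changes field =>
              if PySem.Str.startswith field "_" then changes
              else changes ++ [pvMkChange c detector "added" (some field)
                ("appears in " ++ PySem.Int.toStr ((PySem.Dict.mk ((PySem.Dict.mk current_cat).getD detector [])).getD field 0) ++ " items")]) changes
          (PySem.List.sorted (PySem.Set.diff saved_fields current_fields) (fun f => f)).foldl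
            (fun changes field =>
              if PySem.Str.startswith field "_" then changes
              else changes ++ [pvMkChange c detector "removed" (some field)
                ("was in " ++ PySem.Int.toStr ((PySem.Dict.mk ((PySem.Dict.mk saved_cat).getD detector [])).getD field 0) ++ " items")]) changes1
        ) acc)
    = acc ++ (pvDets saved current c).flatMap (fun d => pvBlockA c d (pvCat saved c) (pvCat current c)) := by
  dsimp only
  rw [pvDetsFold]
  rfl

theorem pv_A_eq_map_fix (saved current : List (String × List (String × List (String × Int)))) :
    diff_inventories saved current = (pvL saved current).map (pvFix (pvL saved current)) := by
  have hchanges : ∀ (cats : List String) (acc : List (List (String × Option String))),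
      cats.foldl (fun changes category =>
        let saved_cat := (PySem.Dict.mk saved).getD category []
        let current_cat := (PySem.Dict.mk current).getD category []
        let all_detectors := PySem.Set.union (PySem.Set.ofList ((PySem.Dict.mk saved_cat).keys))
          (PySem.Set.ofList ((PySem.Dict.mk current_cat).keys))
        (PySem.List.sorted all_detectors (fun d => d)).foldl (fun changes detector =>
          let saved_fields := PySem.Set.ofList ((PySem.Dict.mk ((PySem.Dict.mk saved_cat).getD detector [])).keys)
          let current_fields := PySem.Set.ofList ((PySem.Dict.mk ((PySem.Dict.mk current_cat).getD detector [])).keys)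
          if !((PySem.Dict.mk saved_cat).contains detector) then
            changes ++ [pvMkChange category detector "new_detector" none
              (PySem.Int.toStr (PySem.Set.len current_fields) ++ " fields")]
          else if !((PySem.Dict.mk current_cat).contains detector) then
            changes ++ [pvMkChange category detector "removed_detector" none
              ("had " ++ PySem.Int.toStr (PySem.Set.len saved_fields) ++ " fields")]
          else
            let changes1 := (PySem.List.sorted (PySem.Set.diff current_fields saved_fields) (fun f => f)).foldl
              (fun changes field =>
                if PySem.Str.startswith field "_" then changes
                else changes ++ [pvMkChange category detector "added" (some field)
                  ("appears in " ++ PySem.Int.toStr ((PySem.Dict.mk ((PySem.Dict.mk current_cat).getD detector [])).getD field 0) ++ " items")]) changes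
            (PySem.List.sorted (PySem.Set.diff saved_fields current_fields) (fun f => f)).foldl
              (fun changes field =>
                if PySem.Str.startswith field "_" then changes
                else changes ++ [pvMkChange category detector "removed" (some field)
                  ("was in " ++ PySem.Int.toStr ((PySem.Dict.mk ((PySem.Dict.mk saved_cat).getD detector [])).getD field 0) ++ " items")]) changes1
          ) changes) acc
      = acc ++ cats.flatMap (fun c => (pvDets saved current c).flatMap (fun d => pvBlockA c d (pvCat saved c) (pvCat current c))) := by
    intro cats
    induction cats with
    | nil => intro acc; simp
    | cons c cs ih =>
      intro acc
      rw [List.foldl_cons, List.flatMap_cons, ih, pvCatStep, List.append_assoc]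
  show ((["schematic", "pcb", "spice", "emc", "gerber"].foldl _ []).map _) = _
  rw [hchanges]
  rfl

theorem pv_B_eq (saved current : List (String × List (String × List (String × Int)))) :
    diff_inventories_alt saved current = ["schematic", "pcb", "spice", "emc", "gerber"].flatMap (fun c =>
      (pvDets saved current c).flatMap (fun d => pvDetectorChanges c d (pvCat saved c) (pvCat current c))) := rfl

-- the change-entry dictionary computes: field access and the details update
theorem pvGet_cat (c d ct : String) (fl : Option String) (det : String) :
    (PySem.Dict.mk (pvMkChange c d ct fl det)).get? "category" = some (some c) := rfl
theorem pvGet_det (c d ct : String) (fl : Option String) (det : String) :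
    (PySem.Dict.mk (pvMkChange c d ct fl det)).get? "detector" = some (some d) := rfl
theorem pvGet_ct (c d ct : String) (fl : Option String) (det : String) :
    (PySem.Dict.mk (pvMkChange c d ct fl det)).get? "change_type" = some (some ct) := rfl

theorem pvPred_mk (c d c' d' ct : String) (fl : Option String) (det : String) :
    pvPred c d (pvMkChange c' d' ct fl det) = ((ct == "added") && (d' == d) && (c' == c)) := by
  simp [pvPred, pvGet_ct, pvGet_det, pvGet_cat]

-- the non-underscore added/removed field lists and entry builders of a block
def pvAddedF (sc cc : List (String × List (String × Int))) (d : String) : List String :=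
  (PySem.List.sorted (PySem.Set.diff (PySem.Set.ofList ((PySem.Dict.mk ((PySem.Dict.mk cc).getD d [])).keys))
      (PySem.Set.ofList ((PySem.Dict.mk ((PySem.Dict.mk sc).getD d [])).keys))) (fun f => f)).filter
    (fun f => !(PySem.Str.startswith f "_"))
def pvRemovedF (sc cc : List (String × List (String × Int))) (d : String) : List String :=
  (PySem.List.sorted (PySem.Set.diff (PySem.Set.ofList ((PySem.Dict.mk ((PySem.Dict.mk sc).getD d [])).keys))
      (PySem.Set.ofList ((PySem.Dict.mk ((PySem.Dict.mk cc).getD d [])).keys))) (fun f => f)).filter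
    (fun f => !(PySem.Str.startswith f "_"))
def pvEAdd (c d : String) (cc : List (String × List (String × Int))) (f : String) : List (String × Option String) :=
  pvMkChange c d "added" (some f)
    ("appears in " ++ PySem.Int.toStr ((PySem.Dict.mk ((PySem.Dict.mk cc).getD d [])).getD f 0) ++ " items")
def pvERem (c d : String) (sc : List (String × List (String × Int))) (f : String) : List (String × Option String) :=
  pvMkChange c d "removed" (some f)
    ("was in " ++ PySem.Int.toStr ((PySem.Dict.mk ((PySem.Dict.mk sc).getD d [])).getD f 0) ++ " items")
def pvRenameSfx (sc cc : List (String × List (String × Int))) (d : String) : String :=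
  match (pvAddedF sc cc d).head? with
  | some f => " (possible rename → " ++ f ++ "?)"
  | none => ""

theorem pvBlockA_normal (c d : String) (sc cc : List (String × List (String × Int)))
    (h1 : (PySem.Dict.mk sc).contains d = true) (h2 : (PySem.Dict.mk cc).contains d = true) :
    pvBlockA c d sc cc = (pvAddedF sc cc d).map (pvEAdd c d cc) ++ (pvRemovedF sc cc d).map (pvERem c d sc) := by
  unfold pvBlockA pvAddedF pvRemovedF pvEAdd pvERem
  dsimp only
  rw [h1, h2]
  rfl

theorem pvBlockB_normal (c d : String) (sc cc : List (String × List (String × Int)))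
    (h1 : (PySem.Dict.mk sc).contains d = true) (h2 : (PySem.Dict.mk cc).contains d = true) :
    pvDetectorChanges c d sc cc = (pvAddedF sc cc d).map (pvEAdd c d cc)
      ++ (pvRemovedF sc cc d).map (fun f => pvMkChange c d "removed" (some f)
        ("was in " ++ PySem.Int.toStr ((PySem.Dict.mk ((PySem.Dict.mk sc).getD d [])).getD f 0) ++ " items"
          ++ pvRenameSfx sc cc d)) := by
  unfold pvDetectorChanges pvAddedF pvRemovedF pvEAdd pvRenameSfx
  dsimp only
  rw [h1, h2]
  rfl

theorem pvBlockA_mem (c' d' : String) (sc cc : List (String × List (String × Int)))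
    (e : List (String × Option String)) (he : e ∈ pvBlockA c' d' sc cc) :
    ∃ ct fl det, e = pvMkChange c' d' ct fl det := by
  unfold pvBlockA at he
  dsimp only at he
  split at he
  · simp at he; exact ⟨_, _, _, he⟩
  · split at he
    · simp at he; exact ⟨_, _, _, he⟩
    · rw [List.mem_append] at he
      rcases he with he | he <;> rw [List.mem_map] at he <;> obtain ⟨f, -, rfl⟩ := he
      · exact ⟨_, _, _, rfl⟩
      · exact ⟨_, _, _, rfl⟩

theorem pvPred_foreign (c d c' d' : String) (sc cc : List (String × List (String × Int)))
    (h : ¬(c' = c ∧ d' = d)) : ∀ e ∈ pvBlockA c' d' sc cc, pvPred c d e = false := by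
  intro e he
  obtain ⟨ct, fl, det, rfl⟩ := pvBlockA_mem c' d' sc cc e he
  rw [pvPred_mk]
  simp only [Bool.and_eq_false_iff, beq_eq_false_iff_ne, ne_eq]
  by_cases hc : c' = c
  · exact Or.inl (Or.inr (fun hd => h ⟨hc, hd⟩))
  · exact Or.inr hc

theorem pvFindFlatNone {α β : Type} (l : List α) (blk : α → List β) (p : β → Bool)
    (h : ∀ a ∈ l, ∀ e ∈ blk a, p e = false) : (l.flatMap blk).find? p = none := by
  rw [List.find?_eq_none]
  intro x hx
  rw [List.mem_flatMap] at hx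
  obtain ⟨a, ha, hxe⟩ := hx
  simp [h a ha x hxe]

theorem pvFindFlatUnique {α β : Type} (l : List α) (blk : α → List β) (p : β → Bool) (a₀ : α)
    (hmem : a₀ ∈ l) (hnd : l.Nodup)
    (hother : ∀ a ∈ l, a ≠ a₀ → ∀ e ∈ blk a, p e = false) :
    (l.flatMap blk).find? p = (blk a₀).find? p := by
  induction l with
  | nil => cases hmem
  | cons a l ih =>
    rw [List.flatMap_cons, List.find?_append]
    rcases List.mem_cons.mp hmem with rfl | hmem'
    · have : (l.flatMap blk).find? p = none := by
        apply pvFindFlatNone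
        intro b hb e hebe
        exact hother b (List.mem_cons_of_mem _ hb)
          (fun hba => (List.nodup_cons.mp hnd).1 (hba ▸ hb)) e hebe
      rw [this, Option.or_none]
    · have : (blk a).find? p = none := by
        rw [List.find?_eq_none]
        intro x hx
        have := hother a (List.mem_cons_self) (fun haa => (List.nodup_cons.mp hnd).1 (haa ▸ hmem')) x hx
        simp [this]
      rw [this, Option.none_or]
      exact ih hmem' (List.nodup_cons.mp hnd).2
        (fun b hb hba => hother b (List.mem_cons_of_mem _ hb) hba)

theorem pvFind_block (c d : String) (sc cc : List (String × List (String × Int)))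
    (h1 : (PySem.Dict.mk sc).contains d = true) (h2 : (PySem.Dict.mk cc).contains d = true) :
    (pvBlockA c d sc cc).find? (pvPred c d) = ((pvAddedF sc cc d).map (pvEAdd c d cc)).head? := by
  rw [pvBlockA_normal c d sc cc h1 h2, List.find?_append]
  have hrem : ((pvRemovedF sc cc d).map (pvERem c d sc)).find? (pvPred c d) = none := by
    rw [List.find?_eq_none]
    intro x hx
    rw [List.mem_map] at hx
    obtain ⟨f, -, rfl⟩ := hx
    simp [pvERem, pvPred_mk]
  rw [hrem, Option.or_none]
  cases hA : pvAddedF sc cc d with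
  | nil => rfl
  | cons f fs =>
    rw [List.map_cons, List.find?_cons_of_pos, List.head?_cons]
    simp [pvEAdd, pvPred_mk]

theorem pvFix_not_removed (L : List (List (String × Option String))) (c d ct : String)
    (fl : Option String) (det : String) (hct : (ct == "removed") = false) :
    pvFix L (pvMkChange c d ct fl det) = pvMkChange c d ct fl det := by
  unfold pvFix
  rw [pvGet_ct]
  simp [hct]

theorem pvFix_removed (L : List (List (String × Option String))) (c d : String)
    (fl : Option String) (det : String) :
    pvFix L (pvMkChange c d "removed" fl det) =
      (match L.find? (pvPred c d) with
       | some other => pvMkChange c d "removed" fl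
           (det ++ (" (possible rename → " ++ pvFieldStr ((PySem.Dict.mk other).get? "field") ++ "?)"))
       | none => pvMkChange c d "removed" fl det) := by
  unfold pvFix
  rw [pvGet_ct, pvGet_det, pvGet_cat]
  simp only [beq_self_eq_true, if_true]
  rfl

theorem pvDets_nodup (saved current : List (String × List (String × List (String × Int)))) (c : String) :
    (pvDets saved current c).Nodup := by
  unfold pvDets
  exact (PySem.List.sorted_perm _ _ _).symm.nodup
    (PySem.Set.nodup_union _ _ (PySem.Set.nodup_ofList _))

theorem pvBlockA_new (c d : String) (sc cc : List (String × List (String × Int)))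
    (h1 : (PySem.Dict.mk sc).contains d = false) :
    pvBlockA c d sc cc = [pvMkChange c d "new_detector" none
      (PySem.Int.toStr (PySem.Set.len (PySem.Set.ofList ((PySem.Dict.mk ((PySem.Dict.mk cc).getD d [])).keys))) ++ " fields")] := by
  unfold pvBlockA; dsimp only; rw [h1]; rfl

theorem pvBlockB_new (c d : String) (sc cc : List (String × List (String × Int)))
    (h1 : (PySem.Dict.mk sc).contains d = false) :
    pvDetectorChanges c d sc cc = [pvMkChange c d "new_detector" none
      (PySem.Int.toStr (PySem.Set.len (PySem.Set.ofList ((PySem.Dict.mk ((PySem.Dict.mk cc).getD d [])).keys))) ++ " fields")] := by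
  unfold pvDetectorChanges; dsimp only; rw [h1]; rfl

theorem pvBlockA_rdet (c d : String) (sc cc : List (String × List (String × Int)))
    (h1 : (PySem.Dict.mk sc).contains d = true) (h2 : (PySem.Dict.mk cc).contains d = false) :
    pvBlockA c d sc cc = [pvMkChange c d "removed_detector" none
      ("had " ++ PySem.Int.toStr (PySem.Set.len (PySem.Set.ofList ((PySem.Dict.mk ((PySem.Dict.mk sc).getD d [])).keys))) ++ " fields")] := by
  unfold pvBlockA; dsimp only; rw [h1, h2]; rfl

theorem pvBlockB_rdet (c d : String) (sc cc : List (String × List (String × Int)))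
    (h1 : (PySem.Dict.mk sc).contains d = true) (h2 : (PySem.Dict.mk cc).contains d = false) :
    pvDetectorChanges c d sc cc = [pvMkChange c d "removed_detector" none
      ("had " ++ PySem.Int.toStr (PySem.Set.len (PySem.Set.ofList ((PySem.Dict.mk ((PySem.Dict.mk sc).getD d [])).keys))) ++ " fields")] := by
  unfold pvDetectorChanges; dsimp only; rw [h1, h2]; rfl

theorem pvMapFix_block (c d : String) (sc cc : List (String × List (String × Int)))
    (L : List (List (String × Option String)))
    (hfind : L.find? (pvPred c d) = (pvBlockA c d sc cc).find? (pvPred c d)) :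
    (pvBlockA c d sc cc).map (pvFix L) = pvDetectorChanges c d sc cc := by
  by_cases h1 : (PySem.Dict.mk sc).contains d = true
  · by_cases h2 : (PySem.Dict.mk cc).contains d = true
    · have hAdd : (pvAddedF sc cc d).map (pvFix L ∘ pvEAdd c d cc)
          = (pvAddedF sc cc d).map (pvEAdd c d cc) :=
        List.map_congr_left (fun f _ => pvFix_not_removed L c d "added" (some f) _ (by decide))
      have hRem : (pvRemovedF sc cc d).map (pvFix L ∘ pvERem c d sc)
          = (pvRemovedF sc cc d).map (fun f => pvMkChange c d "removed" (some f)
            ("was in " ++ PySem.Int.toStr ((PySem.Dict.mk ((PySem.Dict.mk sc).getD d [])).getD f 0) ++ " items"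
              ++ pvRenameSfx sc cc d)) := by
        apply List.map_congr_left
        intro f _
        show pvFix L (pvMkChange c d "removed" (some f)
          ("was in " ++ PySem.Int.toStr ((PySem.Dict.mk ((PySem.Dict.mk sc).getD d [])).getD f 0) ++ " items")) = _
        rw [pvFix_removed, hfind, pvFind_block c d sc cc h1 h2]
        unfold pvRenameSfx
        cases hA : pvAddedF sc cc d with
        | nil => simp
        | cons f₀ fs =>
          rw [List.map_cons, List.head?_cons, List.head?_cons]
          rfl
      rw [pvBlockA_normal c d sc cc h1 h2, pvBlockB_normal c d sc cc h1 h2, List.map_append,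
        List.map_map, List.map_map, hAdd, hRem]
    · have h2' : (PySem.Dict.mk cc).contains d = false := by
        cases hcc : (PySem.Dict.mk cc).contains d
        · rfl
        · exact absurd hcc h2
      rw [pvBlockA_rdet c d sc cc h1 h2', pvBlockB_rdet c d sc cc h1 h2',
        List.map_cons, List.map_nil,
        pvFix_not_removed L c d "removed_detector" none _ (by decide)]
  · have h1' : (PySem.Dict.mk sc).contains d = false := by
      cases hcc : (PySem.Dict.mk sc).contains d
      · rfl
      · exact absurd hcc h1
    rw [pvBlockA_new c d sc cc h1', pvBlockB_new c d sc cc h1',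
      List.map_cons, List.map_nil,
      pvFix_not_removed L c d "new_detector" none _ (by decide)]

-- ===== VERDICT (by name: the statement is the Claim_ definition above) =====
theorem diff_inventories_spec : Claim_equal_diff_inventories := by
  intro saved current _
  unfold Spec_diff_inventories
  rw [pv_A_eq_map_fix, pv_B_eq]
  have hL : pvL saved current = ["schematic", "pcb", "spice", "emc", "gerber"].flatMap (fun c =>
      (pvDets saved current c).flatMap (fun d => pvBlockA c d (pvCat saved c) (pvCat current c))) := rfl
  rw [hL, List.map_flatMap]
  apply List.flatMap_congr
  intro c hc
  rw [List.map_flatMap]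
  apply List.flatMap_congr
  intro d hd
  apply pvMapFix_block
  have hstep1 : (["schematic", "pcb", "spice", "emc", "gerber"].flatMap (fun c' =>
      (pvDets saved current c').flatMap (fun d' => pvBlockA c' d' (pvCat saved c') (pvCat current c')))).find? (pvPred c d)
      = ((pvDets saved current c).flatMap (fun d' => pvBlockA c d' (pvCat saved c) (pvCat current c))).find? (pvPred c d) := by
    apply pvFindFlatUnique _ _ _ c hc (by decide)
    intro c' hc' hne e he
    rw [List.mem_flatMap] at he
    obtain ⟨d', -, hed⟩ := he
    exact pvPred_foreign c d c' d' _ _ (fun hcd => hne hcd.1) e hed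
  have hstep2 : ((pvDets saved current c).flatMap (fun d' => pvBlockA c d' (pvCat saved c) (pvCat current c))).find? (pvPred c d)
      = (pvBlockA c d (pvCat saved c) (pvCat current c)).find? (pvPred c d) := by
    apply pvFindFlatUnique _ _ _ d hd (pvDets_nodup saved current c)
    intro d' _ hne e he
    exact pvPred_foreign c d c d' _ _ (fun hcd => hne hcd.2) e he
  exact hstep1.trans hstep2
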